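-- pv_equiv track=rewrite | github.com/nbro/andz | ands/algorithms/dp/plus_sign_game.py | _generate_combinations_matrix
-- ===== SOURCE A (Python) =====
-- def _generate_combinations_matrix(p, combinations):
--     m = [["" for _ in range(p)] for _ in range(combinations)]
--
--     c = combinations - 1
--     interval = combinations // 2
--
--     j = interval
--     sign = "+"
--
--     for i in range(p):
--
--         while c >= 0:
--
--             m[c][i] = sign
--             c -= 1
--             j -= 1
--
--             if j == 0:
--                 j = interval
--                 sign = "" if sign == "+" else "+"
--
--         sign = "+"
--         c = combinations - 1
--         interval //= 2
--         j = interval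
--
--     return m
-- ===== SOURCE B (Python) =====
-- def _generate_combinations_matrix(p, combinations):
--     # Row-major closed form: no mutable sign/counter state.
--     result = []
--     for c in range(combinations):
--         k = combinations - 1 - c
--         row = []
--         interval = combinations // 2
--         for _ in range(p):
--             row.append("+" if interval == 0 or (k // interval) % 2 == 0 else "")
--             interval //= 2
--         result.append(row)
--     return result
-- ===== Notes on version B (the rewrite author's own statement) =====
-- stated objective: simpler
-- what changed: B builds the matrix row-major with a closed-form per-cell formula ('+' iff interval==0 or (k//interval)%2==0, k = rows below) instead of A's column-major in-place fill driven by a mutable sign/down-counter state machine.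
import Mathlib
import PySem

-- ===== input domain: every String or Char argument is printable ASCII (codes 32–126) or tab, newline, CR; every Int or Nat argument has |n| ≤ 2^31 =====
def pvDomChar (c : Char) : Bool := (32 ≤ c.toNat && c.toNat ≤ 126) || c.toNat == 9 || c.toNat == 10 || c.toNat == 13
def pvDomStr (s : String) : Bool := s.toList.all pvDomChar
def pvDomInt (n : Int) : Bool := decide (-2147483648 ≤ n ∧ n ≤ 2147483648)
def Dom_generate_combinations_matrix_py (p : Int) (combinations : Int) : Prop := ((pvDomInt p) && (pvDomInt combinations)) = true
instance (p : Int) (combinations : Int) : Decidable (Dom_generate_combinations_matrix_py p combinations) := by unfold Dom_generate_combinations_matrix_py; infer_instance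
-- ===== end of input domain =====

-- B builds the matrix row-major from a closed-form per-cell formula instead of A's
-- column-major in-place fill driven by a mutable sign/down-counter; objective: simpler.

-- ===== PORT A =====
-- m[c][i] = sign  (row c, column i; indices always in range in A)
def pySetCell (m : List (List String)) (c i : Nat) (s : String) : List (List String) :=
  m.set c ((m.getD c []).set i s)

-- the 'while c >= 0' loop of A, for one column i (m' = m with m[c][i] = sign)
def fillColA (m : List (List String)) (c : Int) (i : Nat) (j : Int) (sign : String)
    (interval : Int) : List (List String) :=
  if h : 0 ≤ c then
    if j - 1 = 0 then
      fillColA (pySetCell m c.toNat i sign) (c - 1) i interval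
        (if sign = "+" then "" else "+") interval
    else
      fillColA (pySetCell m c.toNat i sign) (c - 1) i (j - 1) sign interval
  else m
termination_by (c + 1).toNat
decreasing_by all_goals omega

def generate_combinations_matrix_py (p : Int) (combinations : Int) : List (List String) :=
  let m0 := List.replicate combinations.toNat (List.replicate p.toNat "")
  let st := (List.range p.toNat).foldl
    (fun (st : List (List String) × Int) i =>
      (fillColA st.1 (combinations - 1) i st.2 "+" st.2, PySem.Int.floordiv st.2 2))
    (m0, PySem.Int.floordiv combinations 2)
  st.1

-- ===== PORT B =====
-- "+" if interval == 0 or (k // interval) % 2 == 0 else ""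
def cellB (k interval : Int) : String :=
  if interval = 0 ∨ PySem.Int.mod (PySem.Int.floordiv k interval) 2 = 0 then "+" else ""

-- the inner 'for _ in range(p)' append loop of B (fuel = remaining columns)
def rowB (k interval : Int) : Nat → List String
  | 0 => []
  | fuel + 1 => cellB k interval :: rowB k (PySem.Int.floordiv interval 2) fuel

def generate_combinations_matrix_py_alt (p : Int) (combinations : Int) : List (List String) :=
  (PySem.List.pyRange 0 combinations 1).map
    (fun c => rowB (combinations - 1 - c) (PySem.Int.floordiv combinations 2) p.toNat)

-- ===== PRECONDITION & SPEC =====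
def Spec_generate_combinations_matrix_py (p : Int) (combinations : Int) (out : List (List String)) : Prop := out = generate_combinations_matrix_py_alt p combinations
instance (p : Int) (combinations : Int) (out : List (List String)) : Decidable (Spec_generate_combinations_matrix_py p combinations out) := by unfold Spec_generate_combinations_matrix_py; infer_instance

-- ===== CLAIM (what is proved, stated in full; the proofs are below) =====
def Claim_equal_generate_combinations_matrix_py : Prop := ∀ (p : Int) (combinations : Int), Dom_generate_combinations_matrix_py p combinations → Spec_generate_combinations_matrix_py p combinations (generate_combinations_matrix_py p combinations)

-- ===== LEMMAS AND PROOFS =====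

-- interval after t halvings
def halves (v : Int) : Nat → Int
  | 0 => v
  | t + 1 => halves (PySem.Int.floordiv v 2) t

lemma halves_succ_right (v : Int) (t : Nat) :
    halves v (t + 1) = PySem.Int.floordiv (halves v t) 2 := by
  induction t generalizing v with
  | zero => rfl
  | succ t ih => simpa [halves] using ih (PySem.Int.floordiv v 2)

lemma halves_nonneg (v : Int) (hv : 0 ≤ v) (t : Nat) : 0 ≤ halves v t := by
  induction t generalizing v with
  | zero => simpa [halves]
  | succ t ih =>
      have h2 : PySem.Int.floordiv v 2 = v / 2 := PySem.Int.floordiv_eq_ediv_of_pos (by omega)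
      rw [halves, h2]
      exact ih _ (by omega)

lemma rowB_length (k v : Int) (t : Nat) : (rowB k v t).length = t := by
  induction t generalizing v with
  | zero => rfl
  | succ t ih => simp [rowB, ih]

lemma rowB_succ_right (k v : Int) (t : Nat) :
    rowB k v (t + 1) = rowB k v t ++ [cellB k (halves v t)] := by
  induction t generalizing v with
  | zero => rfl
  | succ t ih =>
      show cellB k v :: rowB k (PySem.Int.floordiv v 2) (t + 1)
          = rowB k v (t + 1) ++ [cellB k (halves (PySem.Int.floordiv v 2) t)]
      rw [ih]
      rfl

lemma cellB_zero (k : Int) : cellB k 0 = "+" := by simp [cellB]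

lemma cellB_zero_arg (v : Int) (hv : 0 < v) : cellB 0 v = "+" := by
  rw [cellB, PySem.Int.floordiv_eq_ediv_of_pos hv,
      PySem.Int.mod_eq_emod_of_pos (by omega : (0:Int) < 2)]
  simp

lemma getD_set_eq {α : Type} (l : List α) (i j : Nat) (a d : α) :
    (l.set i a).getD j d = if i = j ∧ j < l.length then a else l.getD j d := by
  simp [List.getD_eq_getElem?_getD, List.getElem?_set]
  split_ifs <;> simp_all

lemma pySetCell_length (m : List (List String)) (c i : Nat) (s : String) :
    (pySetCell m c i s).length = m.length := by simp [pySetCell]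

lemma fillColA_length : ∀ (t : Nat) (c : Int), (c + 1).toNat ≤ t →
    ∀ m i j sign v, (fillColA m c i j sign v).length = m.length := by
  intro t
  induction t with
  | zero => intro c hc m i j sign v; rw [fillColA, dif_neg (by omega)]
  | succ t ih =>
      intro c hc m i j sign v
      by_cases h : 0 ≤ c
      · rw [fillColA, dif_pos h]
        by_cases hj : j - 1 = 0
        · rw [if_pos hj, ih (c - 1) (by omega), pySetCell_length]
        · rw [if_neg hj, ih (c - 1) (by omega), pySetCell_length]
      · rw [fillColA, dif_neg h]

-- writing sign = f c at row c, then applying f to rows ≤ c-1, gives f on rows ≤ c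
lemma setCell_step (m : List (List String)) (c : Int) (hc : 0 ≤ c) (i r : Nat)
    (w : String) (f : Int → String) (hw : w = f c) :
    (if (r : Int) ≤ c - 1 then ((pySetCell m c.toNat i w).getD r []).set i (f r)
     else (pySetCell m c.toNat i w).getD r [])
    = if (r : Int) ≤ c then (m.getD r []).set i (f r) else m.getD r [] := by
  subst hw
  rw [pySetCell]
  rcases lt_trichotomy (r : Int) c with h | h | h
  · rw [if_pos (by omega), if_pos (by omega), getD_set_eq, if_neg (by
      rintro ⟨h1, -⟩; omega)]
  · have hcr : c.toNat = r := by omega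
    rw [if_neg (by omega), if_pos (by omega), getD_set_eq]
    by_cases hr : r < m.length
    · rw [if_pos ⟨hcr, hr⟩, hcr, h]
    · rw [if_neg (by tauto), List.getD_eq_default _ _ (by omega)]
      simp
  · rw [if_neg (by omega), if_neg (by omega), getD_set_eq, if_neg (by
      rintro ⟨h1, -⟩; omega)]

-- how Python's k % v and k // v evolve when k grows by one (v > 0)
lemma step_arith (k v : Int) (hv : 0 < v) :
    (PySem.Int.mod k v = v - 1 →
       PySem.Int.mod (k + 1) v = 0 ∧
       PySem.Int.floordiv (k + 1) v = PySem.Int.floordiv k v + 1) ∧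
    (PySem.Int.mod k v ≠ v - 1 →
       PySem.Int.mod (k + 1) v = PySem.Int.mod k v + 1 ∧
       PySem.Int.floordiv (k + 1) v = PySem.Int.floordiv k v) := by
  simp only [PySem.Int.mod_eq_emod_of_pos hv, PySem.Int.floordiv_eq_ediv_of_pos hv]
  have hne : v ≠ 0 := by omega
  have h := Int.mul_ediv_add_emod k v
  have hs0 : 0 ≤ k % v := Int.emod_nonneg k hne
  have hsv : k % v < v := Int.emod_lt_of_pos k hv
  constructor
  · intro hs
    have hk1 : k + 1 = v * (k / v + 1) := by linarith
    rw [hk1, Int.mul_emod_right, Int.mul_ediv_cancel_left _ hne]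
    exact ⟨rfl, rfl⟩
  · intro hs
    have hk1 : k + 1 = (k % v + 1) + v * (k / v) := by linarith
    rw [hk1, Int.add_mul_emod_self_left, Int.add_mul_ediv_left _ _ hne,
        Int.emod_eq_of_lt (by omega) (by omega),
        Int.ediv_eq_zero_of_lt (by omega) (by omega)]
    exact ⟨rfl, by ring⟩

lemma cellB_succ (k v : Int) (hv : 0 < v) :
    cellB (k + 1) v =
      if PySem.Int.mod k v = v - 1 then (if cellB k v = "+" then "" else "+")
      else cellB k v := by
  have h := step_arith k v hv
  have hvne : ¬ v = 0 := by omega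
  by_cases hs : PySem.Int.mod k v = v - 1
  · obtain ⟨-, hd⟩ := h.1 hs
    rw [if_pos hs]
    unfold cellB
    rw [hd]
    simp only [PySem.Int.mod_eq_emod_of_pos (by omega : (0:Int) < 2), hvne, false_or]
    by_cases hq : PySem.Int.floordiv k v % 2 = 0
    · have h1 : (PySem.Int.floordiv k v + 1) % 2 = 1 := by omega
      simp [hq, h1]
    · have h1 : (PySem.Int.floordiv k v + 1) % 2 = 0 := by omega
      simp [hq, h1]
  · obtain ⟨-, hd⟩ := h.2 hs
    rw [if_neg hs]
    unfold cellB
    rw [hd]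

-- main inner-loop invariant: the final column entries are cellB (K - r) v
lemma fillColA_spec (K v : Int) (hv : 0 ≤ v) :
    ∀ (t : Nat) (c : Int), (c + 1).toNat ≤ t →
    ∀ (m : List (List String)) (i : Nat) (j : Int) (sign : String),
    (v = 0 → sign = "+" ∧ j ≤ 0) →
    (0 < v → j = v - PySem.Int.mod (K - c) v ∧ sign = cellB (K - c) v) →
    ∀ (r : Nat), (fillColA m c i j sign v).getD r [] =
      if (r : Int) ≤ c then (m.getD r []).set i (cellB (K - r) v) else m.getD r [] := by
  intro t
  induction t with
  | zero =>
      intro c hc m i j sign _ _ r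
      rw [fillColA, dif_neg (by omega), if_neg (by omega)]
  | succ t ih =>
      intro c hc m i j sign h0 hp r
      by_cases hcpos : 0 ≤ c
      · rw [fillColA, dif_pos hcpos]
        have hK1 : K - (c - 1) = (K - c) + 1 := by ring
        by_cases hv0 : v = 0
        · obtain ⟨hsign, hj⟩ := h0 hv0
          rw [if_neg (by omega : ¬ j - 1 = 0)]
          rw [ih (c - 1) (by omega) _ i (j - 1) sign
                (fun _ => ⟨hsign, by omega⟩) (fun hh => absurd hh (by omega)) r]
          exact setCell_step m c hcpos i r sign (fun x => cellB (K - x) v)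
            (by show sign = cellB (K - c) v; rw [hsign, hv0, cellB_zero])
        · have hvpos : 0 < v := by omega
          obtain ⟨hj, hsign⟩ := hp hvpos
          have harith := step_arith (K - c) v hvpos
          have hmod : 0 ≤ PySem.Int.mod (K - c) v ∧ PySem.Int.mod (K - c) v < v := by
            rw [PySem.Int.mod_eq_emod_of_pos hvpos]
            exact ⟨Int.emod_nonneg _ (by omega), Int.emod_lt_of_pos _ hvpos⟩
          by_cases hjz : j - 1 = 0
          · have hs : PySem.Int.mod (K - c) v = v - 1 := by omega
            obtain ⟨hm1, -⟩ := harith.1 hs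
            rw [if_pos hjz]
            rw [ih (c - 1) (by omega) _ i v _
                  (fun hh => absurd hh (by omega))
                  (fun _ => ⟨by rw [hK1, hm1]; ring,
                             by rw [hK1, cellB_succ _ _ hvpos, if_pos hs, hsign]⟩) r]
            exact setCell_step m c hcpos i r sign (fun x => cellB (K - x) v)
              (by show sign = cellB (K - c) v; rw [hsign])
          · have hs : ¬ PySem.Int.mod (K - c) v = v - 1 := by omega
            obtain ⟨hm1, -⟩ := harith.2 hs
            rw [if_neg hjz]
            rw [ih (c - 1) (by omega) _ i (j - 1) _
                  (fun hh => absurd hh (by omega))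
                  (fun _ => ⟨by rw [hK1, hm1]; omega,
                             by rw [hK1, cellB_succ _ _ hvpos, if_neg hs, hsign]⟩) r]
            exact setCell_step m c hcpos i r sign (fun x => cellB (K - x) v)
              (by show sign = cellB (K - c) v; rw [hsign])
      · rw [fillColA, dif_neg hcpos, if_neg (by omega)]

-- outer loop: after i columns, row r is rowB … i padded with "" to width P
lemma outer_fold (n : Int) (hn : 0 ≤ n) (P : Nat) :
    ∀ i, i ≤ P →
    (List.range i).foldl
      (fun (st : List (List String) × Int) col =>
        (fillColA st.1 (n - 1) col st.2 "+" st.2, PySem.Int.floordiv st.2 2))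
      (List.replicate n.toNat (List.replicate P ""), PySem.Int.floordiv n 2)
    = ((List.range n.toNat).map
         (fun (r : Nat) => rowB (n - 1 - (r : Int)) (PySem.Int.floordiv n 2) i
                   ++ List.replicate (P - i) ""),
       halves (PySem.Int.floordiv n 2) i) := by
  have hv0 : 0 ≤ PySem.Int.floordiv n 2 := by
    rw [PySem.Int.floordiv_eq_ediv_of_pos (by omega : (0:Int) < 2)]
    exact Int.ediv_nonneg hn (by omega)
  intro i
  induction i with
  | zero =>
      intro _
      simp only [List.range_zero, List.foldl_nil]
      congr 1
      simp [rowB]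
  | succ i ih =>
      intro hiP
      rw [List.range_succ, List.foldl_append, ih (by omega)]
      simp only [List.foldl_cons, List.foldl_nil]
      have hv : 0 ≤ halves (PySem.Int.floordiv n 2) i := halves_nonneg _ hv0 i
      congr 1
      · -- first component
        apply List.ext_getElem
        · rw [fillColA_length n.toNat (n - 1) (by omega)]
          simp
        · intro r h1 h2
          have hr : r < n.toNat := by simpa using h2
          rw [← List.getD_eq_getElem _ [] h1, ← List.getD_eq_getElem _ [] h2]
          rw [fillColA_spec (n - 1) _ hv n.toNat (n - 1) (by omega) _ _ _ _
                (fun hz => ⟨rfl, by omega⟩)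
                (fun hpos => ⟨by
                    rw [show n - 1 - (n - 1) = 0 from by ring,
                        PySem.Int.mod_eq_emod_of_pos hpos]
                    simp, by
                    rw [show n - 1 - (n - 1) = 0 from by ring, cellB_zero_arg _ hpos]⟩) r]
          rw [if_pos (by omega : (r : Int) ≤ n - 1)]
          rw [PySem.List.getD_map_range _ _ _ _ hr, PySem.List.getD_map_range _ _ _ _ hr]
          rw [rowB_succ_right]
          have hlen : (rowB (n - 1 - (r : Int)) (PySem.Int.floordiv n 2) i).length = i :=
            rowB_length _ _ _
          rw [List.set_append, if_neg (by omega), hlen,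
              show P - i = (P - (i + 1)) + 1 from by omega, List.replicate_succ]
          simp
      · exact (halves_succ_right _ i).symm

-- negative combinations: the matrix is empty and stays empty
lemma foldl_empty (n : Int) (hn : n < 0) : ∀ (l : List Nat) (v : Int),
    ((l.foldl
      (fun (st : List (List String) × Int) col =>
        (fillColA st.1 (n - 1) col st.2 "+" st.2, PySem.Int.floordiv st.2 2))
      ([], v))).1 = [] := by
  intro l
  induction l with
  | nil => intro v; rfl
  | cons a l ih =>
      intro v
      simp only [List.foldl_cons]
      rw [fillColA, dif_neg (by omega)]
      exact ih _

-- ===== VERDICT (by name: the statement is the Claim_ definition above) =====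
theorem generate_combinations_matrix_py_spec : Claim_equal_generate_combinations_matrix_py := by
  intro p n _
  unfold Spec_generate_combinations_matrix_py
  by_cases hn : 0 ≤ n
  · simp only [generate_combinations_matrix_py, generate_combinations_matrix_py_alt]
    rw [outer_fold n hn p.toNat p.toNat (le_refl _), PySem.List.pyRange_one]
    simp [List.map_map, Function.comp]
  · simp only [generate_combinations_matrix_py, generate_combinations_matrix_py_alt]
    rw [PySem.List.pyRange_one_eq_nil (by omega)]
    rw [show n.toNat = 0 from by omega]
    simp only [List.replicate_zero, List.map_nil]
    exact foldl_empty n (by omega) _ _
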